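-- pv_equiv track=rewrite | github.com/RahuL-0104/AIE22174DAALAB | PART 2/q5.py | min_max_merge
-- ===== SOURCE A (Python) =====
-- def min_max_merge(l):
--     mmin=l[0][0]
--     mmax=l[0][1]
--     for i in l:
--         if i[0]<mmin:
--             mmin=i[0]
--         if i[1]>mmax:
--             mmax=i[1]
--     return [mmin,mmax]
-- ===== SOURCE B (Python) =====
-- def min_max_merge(l):
--     starts = sorted(x for x, _ in l)
--     ends = sorted(y for _, y in l)
--     return [starts[0], ends[-1]]
-- ===== Notes on version B (the rewrite author's own statement) =====
-- stated objective: alternative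
-- what changed: Replaces the single fused scan maintaining both running extrema with sort-then-pick: sort the starts and take the first element, sort the ends and take the last; correct because the head of an ascending sort is the minimum and its last element is the maximum.
import Mathlib
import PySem

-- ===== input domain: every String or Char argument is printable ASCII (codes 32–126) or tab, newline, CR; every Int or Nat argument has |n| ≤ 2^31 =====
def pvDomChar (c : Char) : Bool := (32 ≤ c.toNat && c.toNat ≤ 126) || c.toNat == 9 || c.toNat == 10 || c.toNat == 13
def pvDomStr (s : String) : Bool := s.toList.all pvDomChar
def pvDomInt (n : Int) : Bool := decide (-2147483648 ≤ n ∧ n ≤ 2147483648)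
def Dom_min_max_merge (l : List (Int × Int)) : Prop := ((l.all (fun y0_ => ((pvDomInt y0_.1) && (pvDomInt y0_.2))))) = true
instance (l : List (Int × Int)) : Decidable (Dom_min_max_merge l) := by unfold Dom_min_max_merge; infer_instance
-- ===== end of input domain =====

-- B replaces A's single fused scan with sort-then-pick (sort the starts, take head; sort the ends, take last); equivalence is about the return value only.

-- ===== PORT A =====
-- one fused loop over l maintaining both running extrema at once
def min_max_merge (l : List (Int × Int)) : List Int :=
  match PySem.List.pyGet? l 0 with
  | none => []          -- IndexError in Python; excluded by Pre_
  | some p =>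
    let st := l.foldl (fun (s : Int × Int) i =>
      (if i.1 < s.1 then i.1 else s.1, if i.2 > s.2 then i.2 else s.2)) (p.1, p.2)
    [st.1, st.2]

-- ===== PORT B =====
-- sort-then-pick: sorted starts, take element 0; sorted ends, take element -1
def min_max_merge_alt (l : List (Int × Int)) : List Int :=
  let starts := PySem.List.sorted (l.map Prod.fst) (fun x => x) false
  let ends := PySem.List.sorted (l.map Prod.snd) (fun x => x) false
  match PySem.List.pyGet? starts 0, PySem.List.pyGet? ends (-1) with
  | some a, some b => [a, b]
  | _, _ => []          -- IndexError in Python; excluded by Pre_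

-- ===== PRECONDITION & SPEC =====
-- both programs raise IndexError on the empty list
def Pre_min_max_merge (l : List (Int × Int)) : Prop := l ≠ []
instance (l : List (Int × Int)) : Decidable (Pre_min_max_merge l) := by unfold Pre_min_max_merge; infer_instance
def pvWitness_min_max_merge : (List (Int × Int)) := [(1, 3), (-2, 5)]
def Spec_min_max_merge (l : List (Int × Int)) (out : List Int) : Prop := out = min_max_merge_alt l
instance (l : List (Int × Int)) (out : List Int) : Decidable (Spec_min_max_merge l out) := by unfold Spec_min_max_merge; infer_instance

-- ===== CLAIM (what is proved, stated in full; the proofs are below) =====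
def Claim_equal_min_max_merge : Prop := ∀ (l : List (Int × Int)), Dom_min_max_merge l → Pre_min_max_merge l → Spec_min_max_merge l (min_max_merge l)

-- ===== LEMMAS AND PROOFS =====

-- A's fused fold computes componentwise the running min of the firsts and running max of the seconds
theorem fused_foldl_eq (xs : List (Int × Int)) (a b : Int) :
    xs.foldl (fun (s : Int × Int) i =>
      (if i.1 < s.1 then i.1 else s.1, if i.2 > s.2 then i.2 else s.2)) (a, b)
    = ((xs.map Prod.fst).foldl min a, (xs.map Prod.snd).foldl max b) := by
  induction xs generalizing a b with
  | nil => rfl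
  | cons h t ih =>
    simp only [List.foldl_cons, List.map_cons, ih]
    congr 1 <;> [skip; skip] <;> congr 1 <;> omega

theorem foldl_min_mem (xs : List Int) : ∀ a : Int, xs.foldl min a ∈ a :: xs := by
  induction xs with
  | nil => simp
  | cons h t ih =>
    intro a
    have hm := ih (min a h)
    rcases List.mem_cons.1 hm with hm' | hm'
    · rcases le_total a h with hle | hle
      · rw [min_eq_left hle] at hm'
        simp [List.foldl_cons, min_eq_left hle, hm']
      · rw [min_eq_right hle] at hm'
        simp [List.foldl_cons, min_eq_right hle, hm']
    · simp [List.foldl_cons, hm']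

theorem foldl_min_le_init (xs : List Int) : ∀ a : Int, xs.foldl min a ≤ a := by
  induction xs with
  | nil => simp
  | cons h t ih =>
    intro a
    exact le_trans (ih (min a h)) (min_le_left _ _)

theorem foldl_min_le_mem (xs : List Int) : ∀ (a y : Int), y ∈ xs → xs.foldl min a ≤ y := by
  induction xs with
  | nil => simp
  | cons h t ih =>
    intro a y hy
    rcases List.mem_cons.1 hy with rfl | hy'
    · exact le_trans (foldl_min_le_init t (min a y)) (min_le_right _ _)
    · exact ih (min a h) y hy'

theorem foldl_max_mem (xs : List Int) : ∀ a : Int, xs.foldl max a ∈ a :: xs := by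
  induction xs with
  | nil => simp
  | cons h t ih =>
    intro a
    have hm := ih (max a h)
    rcases List.mem_cons.1 hm with hm' | hm'
    · rcases le_total a h with hle | hle
      · rw [max_eq_right hle] at hm'
        simp [List.foldl_cons, max_eq_right hle, hm']
      · rw [max_eq_left hle] at hm'
        simp [List.foldl_cons, max_eq_left hle, hm']
    · simp [List.foldl_cons, hm']

theorem foldl_max_ge_init (xs : List Int) : ∀ a : Int, a ≤ xs.foldl max a := by
  induction xs with
  | nil => simp
  | cons h t ih =>
    intro a
    exact le_trans (le_max_left _ _) (ih (max a h))

theorem foldl_max_ge_mem (xs : List Int) : ∀ (a y : Int), y ∈ xs → y ≤ xs.foldl max a := by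
  induction xs with
  | nil => simp
  | cons h t ih =>
    intro a y hy
    rcases List.mem_cons.1 hy with rfl | hy'
    · exact le_trans (le_max_right _ _) (foldl_max_ge_init t (max a y))
    · exact ih (max a h) y hy'

-- last element of a (· ≤ ·)-pairwise list bounds every element from above
theorem pairwise_le_getLast (xs : List Int) (hp : xs.Pairwise (· ≤ ·)) (h : xs ≠ [])
    (y : Int) (hy : y ∈ xs) : y ≤ xs.getLast h := by
  induction xs with
  | nil => simp_all
  | cons a t ih =>
    rcases List.mem_cons.1 hy with rfl | hy'
    · cases t with
      | nil => simp [List.getLast]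
      | cons b u =>
        have hlast : (y :: b :: u).getLast h = (b :: u).getLast (by simp) := by
          simp [List.getLast]
        rw [hlast]
        exact (List.pairwise_cons.1 hp).1 _ (List.getLast_mem _)
    · cases t with
      | nil => simp_all
      | cons b u =>
        have hlast : (a :: b :: u).getLast h = (b :: u).getLast (by simp) := by
          simp [List.getLast]
        rw [hlast]
        exact ih (List.pairwise_cons.1 hp).2 (by simp) hy'

theorem min_max_merge_spec : Claim_equal_min_max_merge := by
  intro l _ hpre
  unfold Spec_min_max_merge min_max_merge min_max_merge_alt
  match l with
  | [] => exact absurd rfl hpre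
  | (a, b) :: t =>
    set fs : List Int := ((a, b) :: t).map Prod.fst with hfs
    set es : List Int := ((a, b) :: t).map Prod.snd with hes
    have hfsne : fs ≠ [] := by simp [hfs]
    have hesne : es ≠ [] := by simp [hes]
    have hsne : PySem.List.sorted fs (fun x => x) false ≠ [] := by
      simpa [PySem.List.sorted_eq_nil_iff] using hfsne
    have hene : PySem.List.sorted es (fun x => x) false ≠ [] := by
      simpa [PySem.List.sorted_eq_nil_iff] using hesne
    obtain ⟨m, ms, hm⟩ := List.exists_cons_of_ne_nil hsne
    -- head of the sorted starts is the fold's running minimum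
    have hmem_m : m ∈ fs :=
      (PySem.List.mem_sorted fs (fun x => x) false m).1 (hm ▸ List.mem_cons_self)
    have hmlb : ∀ y ∈ fs, m ≤ y := by
      intro y hy
      simpa using PySem.List.key_head_sorted_le fs (fun x => x) hm y hy
    have hmin : (t.map Prod.fst).foldl min a = m := by
      apply le_antisymm
      · rcases List.mem_cons.1 (by simpa [hfs] using hmem_m : m ∈ a :: t.map Prod.fst)
          with rfl | hmem'
        · exact foldl_min_le_init _ _
        · exact foldl_min_le_mem _ _ _ hmem'
      · apply hmlb
        have := foldl_min_mem (t.map Prod.fst) a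
        simpa [hfs] using this
    -- last element of the sorted ends is the fold's running maximum
    set M := (PySem.List.sorted es (fun x => x) false).getLast hene with hM
    have hlast : PySem.List.pyGet? (PySem.List.sorted es (fun x => x) false) (-1)
        = some M := by
      rw [PySem.List.pyGet?_neg_one]
      exact List.getLast?_eq_some_getLast hene
    have hmem_M : M ∈ es :=
      (PySem.List.mem_sorted es (fun x => x) false M).1 (List.getLast_mem _)
    have hMub : ∀ y ∈ es, y ≤ M := by
      intro y hy
      have hy' : y ∈ PySem.List.sorted es (fun x => x) false :=
        (PySem.List.mem_sorted es (fun x => x) false y).2 hy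
      exact pairwise_le_getLast _
        (by simpa using PySem.List.sorted_pairwise es (fun x => x)) hene y hy'
    have hmax : (t.map Prod.snd).foldl max b = M := by
      apply le_antisymm
      · apply hMub
        have := foldl_max_mem (t.map Prod.snd) b
        simpa [hes] using this
      · rcases List.mem_cons.1 (by simpa [hes] using hmem_M : M ∈ b :: t.map Prod.snd)
          with heq | hmem'
        · exact heq ▸ foldl_max_ge_init _ _
        · exact foldl_max_ge_mem _ _ _ hmem'
    -- assemble both sides
    rw [← hfs, ← hes] at *
    simp only [PySem.List.pyGet?_zero_cons, hm, hlast, List.foldl_cons, fused_foldl_eq]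
    simpa [hfs, hes] using And.intro hmin hmax
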